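-- pv_equiv track=rewrite | github.com/GalKuhar/PSA | gal_kuhar_2.py | powsumlist
-- ===== SOURCE A (Python) =====
-- def powsumlist(n, q, t):
--     # za 4, 10, 10000 vrne [0,1,11,111,1111]
--     sum = 1
--     pow = q % t
--     powsumlist_q = [0]
--     for i in range(n):
--         powsumlist_q.append(sum)
--         sum += pow
--         sum %= t
--         pow = (pow * q) % t
--
--     return powsumlist_q
-- ===== SOURCE B (Python) =====
-- def powsumlist(n, q, t):
--     # Two passes: build the table of geometric terms with modular exponentiation,
--     # then take running partial sums mod t, seeded from the leading 0.
--     terms = [pow(q, j, t) for j in range(n)]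
--     sums = [0]
--     acc = 0
--     for x in terms:
--         acc = (acc + x) % t
--         sums.append(acc)
--     return sums
-- ===== Notes on version B (the rewrite author's own statement) =====
-- stated objective: alternative
-- what changed: A interleaves the running sum with a manually maintained running power in one loop; B first materializes the whole term table with the builtin three-argument pow and then folds running partial sums mod t over it in a separate pass.
-- intended difference: For n >= 1 with t = 1 or t < 0, A's second entry is the unreduced seed 1 while every other entry is reduced mod t; B reduces every partial sum, which is the intended list of residues mod t (e.g. for t = 1 the entries must all be 0). — e.g. on powsumlist(1, 0, 1): A returns [0, 1], B returns [0, 0]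
import Mathlib
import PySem

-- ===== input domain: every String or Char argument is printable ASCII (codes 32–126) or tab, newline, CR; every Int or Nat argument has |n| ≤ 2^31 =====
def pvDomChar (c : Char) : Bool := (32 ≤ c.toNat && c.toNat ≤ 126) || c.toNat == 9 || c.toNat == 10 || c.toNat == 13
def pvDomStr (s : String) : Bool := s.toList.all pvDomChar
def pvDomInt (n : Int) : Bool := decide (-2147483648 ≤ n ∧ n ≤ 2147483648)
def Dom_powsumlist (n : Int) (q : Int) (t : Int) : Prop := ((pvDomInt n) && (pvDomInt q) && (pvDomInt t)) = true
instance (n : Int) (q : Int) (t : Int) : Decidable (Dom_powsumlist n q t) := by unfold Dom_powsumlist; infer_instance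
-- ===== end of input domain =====

-- B builds the modular-power term table first, then folds running partial sums mod t in a second
-- pass (alternative decomposition of A's single interleaved sum/power loop). Proved equal for
-- t ≠ 0 outside D_ (n ≥ 1 with t = 1 or t < 0), where A's unreduced second entry and B's reduced
-- one provably differ.


-- ===== PORT A =====
-- A: one loop carrying (sum, pow, result); appends sum, then updates sum and pow mod t.
def powsumlist (n : Int) (q : Int) (t : Int) : List Int :=
  (PySem.List.pyRange 0 n 1).foldl
    (fun (st : Int × Int × List Int) _ =>
      let acc := st.2.2 ++ [st.1]
      let sum := PySem.Int.mod (st.1 + st.2.1) t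
      let pw := PySem.Int.mod (st.2.1 * q) t
      (sum, pw, acc))
    (1, PySem.Int.mod q t, [0])
  |>.2.2

-- ===== PORT B =====
-- B: materialize the term table pow(q, j, t) for j in range(n), then a separate
-- running-sum pass with accumulator acc seeded at 0 and the list seeded at [0].
def powsumlist_alt (n : Int) (q : Int) (t : Int) : List Int :=
  let terms := (PySem.List.pyRange 0 n 1).map (fun j => PySem.Int.powMod q j.toNat t)
  (terms.foldl
    (fun (st : Int × List Int) x =>
      let acc := PySem.Int.mod (st.1 + x) t
      (acc, st.2 ++ [acc]))
    (0, [0])).2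

-- ===== PRECONDITION & SPEC =====
-- Pre_ excludes exactly t = 0, where Python A raises ZeroDivisionError at 'q % t'.
def Pre_powsumlist (n : Int) (q : Int) (t : Int) : Prop := t ≠ 0
instance (n : Int) (q : Int) (t : Int) : Decidable (Pre_powsumlist n q t) := by unfold Pre_powsumlist; infer_instance
def pvWitness_powsumlist : Int × Int × Int := (4, 10, 10000)

-- For n ≥ 1 with t = 1 or t < 0, A's second entry is the unreduced seed 1 while every other entry
-- is reduced mod t; B reduces every partial sum, the intended list of residues mod t.
def D_powsumlist (n : Int) (q : Int) (t : Int) : Prop := 1 ≤ n ∧ t ≤ 1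
instance (n : Int) (q : Int) (t : Int) : Decidable (D_powsumlist n q t) := by unfold D_powsumlist; infer_instance

def Spec_powsumlist (n : Int) (q : Int) (t : Int) (out : List Int) : Prop := ¬ D_powsumlist n q t → out = powsumlist_alt n q t
instance (n : Int) (q : Int) (t : Int) (out : List Int) : Decidable (Spec_powsumlist n q t out) := by unfold Spec_powsumlist; infer_instance

def pvDiffWitness_powsumlist : Int × Int × Int := (1, 0, 1)
def pvDiffWitnessOut_powsumlist : (List Int) × (List Int) := ([0, 1], [0, 0])

-- ===== CLAIM (what is proved, stated in full; the proofs are below) =====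
def Claim_unchanged_powsumlist : Prop := ∀ (n : Int) (q : Int) (t : Int), Dom_powsumlist n q t → Pre_powsumlist n q t → Spec_powsumlist n q t (powsumlist n q t)
def Claim_changed_powsumlist : Prop := Dom_powsumlist (pvDiffWitness_powsumlist.1) (pvDiffWitness_powsumlist.2.1) (pvDiffWitness_powsumlist.2.2) ∧ Pre_powsumlist (pvDiffWitness_powsumlist.1) (pvDiffWitness_powsumlist.2.1) (pvDiffWitness_powsumlist.2.2) ∧ D_powsumlist (pvDiffWitness_powsumlist.1) (pvDiffWitness_powsumlist.2.1) (pvDiffWitness_powsumlist.2.2) ∧ powsumlist (pvDiffWitness_powsumlist.1) (pvDiffWitness_powsumlist.2.1) (pvDiffWitness_powsumlist.2.2) = pvDiffWitnessOut_powsumlist.1 ∧ powsumlist_alt (pvDiffWitness_powsumlist.1) (pvDiffWitness_powsumlist.2.1) (pvDiffWitness_powsumlist.2.2) = pvDiffWitnessOut_powsumlist.2 ∧ pvDiffWitnessOut_powsumlist.1 ≠ pvDiffWitnessOut_powsumlist.2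
def Claim_exact_powsumlist : Prop := ∀ (n : Int) (q : Int) (t : Int), Dom_powsumlist n q t → Pre_powsumlist n q t → D_powsumlist n q t → powsumlist n q t ≠ powsumlist_alt n q t

-- ===== LEMMAS AND PROOFS =====

-- A's partial-sum sequence: S 0 = 1 (unreduced seed), S (k+1) = (S k + q^(k+1) mod t) mod t
def pvS (q t : Int) : Nat → Int
  | 0 => 1
  | k+1 => PySem.Int.mod (pvS q t k + PySem.Int.mod (q ^ (k+1)) t) t

-- B's accumulator sequence: a 0 = 0, a (k+1) = (a k + q^k mod t) mod t
def pvB (q t : Int) : Nat → Int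
  | 0 => 0
  | k+1 => PySem.Int.mod (pvB q t k + PySem.Int.mod (q ^ k) t) t

lemma fmod_mul_congr (a q t : Int) : ((a.fmod t) * q).fmod t = (a * q).fmod t := by
  conv_lhs => rw [show a.fmod t = a - t * (a.fdiv t) by
    have := Int.fmod_add_mul_fdiv a t; linarith]
  rw [sub_mul, mul_assoc, Int.sub_mul_fmod_self_left]

lemma A_loop (q t : Int) (m : Nat) :
    (PySem.List.pyRange 0 (m : Int) 1).foldl
      (fun (st : Int × Int × List Int) _ =>
        let acc := st.2.2 ++ [st.1]
        let sum := PySem.Int.mod (st.1 + st.2.1) t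
        let pw := PySem.Int.mod (st.2.1 * q) t
        (sum, pw, acc))
      (1, PySem.Int.mod q t, [0])
    = (pvS q t m, PySem.Int.mod (q ^ (m+1)) t, 0 :: (List.range m).map (pvS q t)) := by
  induction m with
  | zero => simp [pvS, PySem.Int.mod]
  | succ k ih =>
    rw [show ((k+1 : Nat) : Int) = (k : Int) + 1 by push_cast; ring,
        PySem.List.pyRange_one_succ_right (by positivity), List.foldl_append, ih]
    simp only [List.foldl_cons, List.foldl_nil, List.range_succ, List.map_append, List.map_cons,
      List.map_nil]
    refine Prod.ext ?_ (Prod.ext ?_ ?_)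
    · simp [pvS]
    · show PySem.Int.mod (PySem.Int.mod (q ^ (k+1)) t * q) t = PySem.Int.mod (q ^ (k+1+1)) t
      simp only [PySem.Int.mod, fmod_mul_congr, pow_succ]
    · simp

lemma B_loop (q t : Int) (m : Nat) :
    (((PySem.List.pyRange 0 (m : Int) 1).map
        (fun j => PySem.Int.powMod q j.toNat t)).foldl
      (fun (st : Int × List Int) x =>
        let acc := PySem.Int.mod (st.1 + x) t
        (acc, st.2 ++ [acc]))
      (0, [0]))
    = (pvB q t m, 0 :: (List.range m).map (fun i => pvB q t (i+1))) := by
  induction m with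
  | zero => simp [pvB]
  | succ k ih =>
    rw [show ((k+1 : Nat) : Int) = (k : Int) + 1 by push_cast; ring,
        PySem.List.pyRange_one_succ_right (by positivity), List.map_append, List.foldl_append, ih]
    have hkt : ((k : Nat) : Int).toNat = k := by omega
    simp only [List.map_cons, List.map_nil, List.foldl_cons, List.foldl_nil,
      PySem.Int.powMod, hkt, List.range_succ, List.map_append]
    refine Prod.ext ?_ ?_
    · simp [pvB]
    · simp [pvB]

lemma pyRange_toNat (n : Int) :
    PySem.List.pyRange 0 n 1 = PySem.List.pyRange 0 ((n.toNat : Int)) 1 := by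
  by_cases h : 0 ≤ n
  · rw [Int.toNat_of_nonneg h]
  · rw [PySem.List.pyRange_one_eq_nil (by omega), PySem.List.pyRange_one_eq_nil (by omega)]

lemma mod_one_eq_one (t : Int) (h : 2 ≤ t) : PySem.Int.mod 1 t = 1 := by
  simp only [PySem.Int.mod, Int.fmod_eq_emod]
  rw [if_pos (Or.inl (by omega)), Int.emod_eq_of_lt (by norm_num) (by omega)]
  ring

lemma pvB_eq_pvS (q t : Int) (h : 2 ≤ t) : ∀ k, pvB q t (k+1) = pvS q t k := by
  intro k
  induction k with
  | zero =>
    show PySem.Int.mod (0 + PySem.Int.mod (q ^ 0) t) t = 1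
    rw [pow_zero, mod_one_eq_one t h, zero_add, mod_one_eq_one t h]
  | succ k ih =>
    show PySem.Int.mod (pvB q t (k+1) + PySem.Int.mod (q ^ (k+1)) t) t = pvS q t (k+1)
    rw [ih]; rfl

-- any fmod with modulus t ≤ 1, t ≠ 0 is never 1
lemma mod_ne_one (x t : Int) (ht0 : t ≠ 0) (ht1 : t ≤ 1) : PySem.Int.mod x t ≠ 1 := by
  simp only [PySem.Int.mod, Int.fmod_eq_emod]
  split_ifs with h
  · rcases h with h | h
    · have ht : t = 1 := by omega
      subst ht; simp
    · rw [Int.emod_eq_zero_of_dvd h]; norm_num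
  · push_neg at h
    have htneg : t < 0 := by omega
    have h1 : x % t = x % (-t) := by rw [Int.emod_neg]
    have h2 : 0 ≤ x % (-t) := Int.emod_nonneg x (by omega)
    have h3 : x % (-t) < -t := Int.emod_lt_of_pos x (by omega)
    omega

-- ===== VERDICT (by name: the statements are the Claim_ definitions above) =====
theorem powsumlist_spec : Claim_unchanged_powsumlist := by
  intro n q t _ _ hnd
  show powsumlist n q t = powsumlist_alt n q t
  unfold powsumlist powsumlist_alt
  dsimp only
  rw [pyRange_toNat n, A_loop, B_loop]
  dsimp only
  rcases Nat.eq_zero_or_pos n.toNat with hm | hm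
  · rw [hm]; rfl
  · have ht : 2 ≤ t := by
      by_contra ht
      exact hnd ⟨by omega, by omega⟩
    congr 1
    apply List.map_congr_left
    intro i _
    rw [pvB_eq_pvS q t ht]

theorem powsumlist_changed : Claim_changed_powsumlist := by
  unfold Claim_changed_powsumlist; decide

theorem powsumlist_tight : Claim_exact_powsumlist := by
  intro n q t _ hpre hD
  obtain ⟨hn, ht⟩ := hD
  unfold powsumlist powsumlist_alt
  dsimp only
  rw [pyRange_toNat n, A_loop, B_loop]
  dsimp only
  obtain ⟨k, hk⟩ : ∃ k, n.toNat = k + 1 := ⟨n.toNat - 1, by omega⟩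
  rw [hk]
  intro hEq
  have h1 : (List.range (k+1)).map (pvS q t) = (List.range (k+1)).map (fun i => pvB q t (i+1)) := by
    injection hEq
  have h2 : pvS q t 0 = pvB q t 1 := by
    have := congrArg (fun l => l.headI) h1
    simpa [List.range_succ_eq_map] using this
  have h3 : pvB q t 1 ≠ 1 := by
    show PySem.Int.mod (0 + PySem.Int.mod (q ^ 0) t) t ≠ 1
    exact mod_ne_one _ t hpre ht
  exact h3 (h2 ▸ rfl)
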